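-- pv_equiv track=rewrite | github.com/AdarshGaur/Competitive-Programming | LeetCode/2266. Count Number of Texts.py | countTexts
-- ===== SOURCE A (Python) =====
-- def countTexts(s: str) -> int:
--     cache = [0 for _ in range(len(s)+1)]
--     cache[0] = 1
--     for i in range(0, len(s)):
--         cache[i+1] = cache[i]
--         if i > 0 and s[i] == s[i-1]:
--             cache[i+1] += cache[i-1]
--             if i > 1 and s[i] == s[i-2]:
--                 cache[i+1] += cache[i-2]
--                 if i > 2 and s[i] == s[i-3] and (s[i] == '7' or s[i] == '9'):
--                     cache[i+1] += cache[i-3]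
--         cache[i+1] %= (10**9 +7)
--     return cache[-1]
-- ===== SOURCE B (Python) =====
-- def countTexts(s: str) -> int:
--     MOD = 10**9 + 7
--     # group s into maximal runs of identical characters
--     runs = []
--     for ch in s:
--         if runs and runs[-1][0] == ch:
--             runs[-1][1] += 1
--         else:
--             runs.append([ch, 1])
--     ans = 1
--     for ch, length in runs:
--         ans = ans * run_ways(4 if ch in '79' else 3, length) % MOD
--     return ans
--
--
-- def run_ways(maxstep: int, length: int) -> int:
--     # ordered compositions of `length` into parts of size <= maxstep, mod 1e9+7
--     ways = [1]
--     for j in range(1, length + 1):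
--         ways.append(sum(ways[max(0, j - maxstep):]) % (10**9 + 7))
--     return ways[-1]
-- ===== Notes on version B (the rewrite author's own statement) =====
-- stated objective: alternative
-- what changed: Replaced the global index-based DP over a preallocated cache array by grouping the string into maximal runs of identical characters and multiplying per-run bounded-composition counts (a small tribonacci/tetranacci list recurrence per run) mod 1e9+7.
import Mathlib
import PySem

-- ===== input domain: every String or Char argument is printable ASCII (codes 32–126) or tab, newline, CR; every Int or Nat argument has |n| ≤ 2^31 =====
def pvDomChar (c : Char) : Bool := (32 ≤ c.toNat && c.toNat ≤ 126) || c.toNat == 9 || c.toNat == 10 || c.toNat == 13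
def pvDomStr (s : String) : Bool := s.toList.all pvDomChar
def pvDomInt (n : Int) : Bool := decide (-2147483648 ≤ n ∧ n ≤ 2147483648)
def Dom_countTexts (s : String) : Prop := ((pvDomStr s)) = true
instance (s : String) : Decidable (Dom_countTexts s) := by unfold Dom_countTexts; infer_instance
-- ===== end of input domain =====

-- B re-implements the keypad-decoding count by grouping the string into maximal runs of equal
-- characters and multiplying per-run composition counts mod 1e9+7 (alternative decomposition).

-- ===== PORT A =====
-- loop body of A: cache[i+1] = cache[i] (+ cache[i-1] (+ cache[i-2] (+ cache[i-3]))), then % 1e9+7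
def astep (cs : List Char) (cache : List Int) (i : Nat) : List Int :=
  let v : Int := cache.getD i 0
  let v : Int :=
    if 0 < i ∧ cs.getD i ' ' = cs.getD (i-1) ' ' then
      let v := v + cache.getD (i-1) 0
      if 1 < i ∧ cs.getD i ' ' = cs.getD (i-2) ' ' then
        let v := v + cache.getD (i-2) 0
        if 2 < i ∧ cs.getD i ' ' = cs.getD (i-3) ' ' ∧ (cs.getD i ' ' = '7' ∨ cs.getD i ' ' = '9') then
          v + cache.getD (i-3) 0
        else v
      else v
    else v
  cache.set (i+1) (v % 1000000007)

def countTexts (s : String) : Int :=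
  let cs := s.toList
  let n := cs.length
  -- cache = [0 for _ in range(len(s)+1)]; cache[0] = 1
  let cache0 : List Int := ((List.range (n+1)).map (fun _ => (0:Int))).set 0 1
  let cache := (List.range n).foldl (astep cs) cache0
  (PySem.List.pyGet? cache (-1)).getD 0      -- return cache[-1]

-- ===== PORT B =====
-- grouping loop body: extend the last run or start a new one
def runStep (runs : List (Char × Nat)) (ch : Char) : List (Char × Nat) :=
  match runs.getLast? with
  | some (c, k) => if c = ch then runs.dropLast ++ [(c, k+1)] else runs ++ [(ch, 1)]
  | none => [(ch, 1)]

def runsOf (cs : List Char) : List (Char × Nat) := cs.foldl runStep []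

-- run_ways: ways[j] = sum(ways[max(0, j-maxstep):]) % (10**9+7)  (Nat subtraction = max(0,·))
def runWays (m : Nat) : Nat → List Int
  | 0 => [(1:Int)]
  | L+1 =>
    let ws := runWays m L
    ws ++ [(ws.drop (ws.length - m)).sum % 1000000007]

def countTexts_alt (s : String) : Int :=
  (runsOf s.toList).foldl (fun acc r =>
    acc * (runWays (if r.1 = '7' ∨ r.1 = '9' then 4 else 3) r.2).getLastD 0 % 1000000007) 1

-- ===== PRECONDITION & SPEC =====
def Spec_countTexts (s : String) (out : Int) : Prop := out = countTexts_alt s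
instance (s : String) (out : Int) : Decidable (Spec_countTexts s out) := by unfold Spec_countTexts; infer_instance

-- ===== CLAIM (what is proved, stated in full; the proofs are below) =====
def Claim_equal_countTexts : Prop := ∀ (s : String), Dom_countTexts s → Spec_countTexts s (countTexts s)

-- ===== LEMMAS AND PROOFS =====

-- mathematical model of A's cache: cfun cs i = cache[i]
def cfun (cs : List Char) : Nat → Int
  | 0 => 1
  | (i+1) =>
    (cfun cs i +
      (if 0 < i ∧ cs.getD i ' ' = cs.getD (i-1) ' ' then
        cfun cs (i-1) +
          (if 1 < i ∧ cs.getD i ' ' = cs.getD (i-2) ' ' then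
            cfun cs (i-2) +
              (if 2 < i ∧ cs.getD i ' ' = cs.getD (i-3) ' ' ∧ (cs.getD i ' ' = '7' ∨ cs.getD i ' ' = '9') then
                cfun cs (i-3) else 0)
            else 0)
        else 0)) % 1000000007
termination_by i => i
decreasing_by all_goals omega

-- per-run count: number of decodings of a run of length L on a key with maxstep m
def w (m L : Nat) : Int := (runWays m L).getLastD 0

def bstep (acc : Int) (r : Char × Nat) : Int :=
  acc * w (if r.1 = '7' ∨ r.1 = '9' then 4 else 3) r.2 % 1000000007

lemma alt_eq (s : String) : countTexts_alt s = (runsOf s.toList).foldl bstep 1 := rfl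

lemma w_zero (m : Nat) : w m 0 = 1 := rfl

lemma runWays_length (m L : Nat) : (runWays m L).length = L + 1 := by
  induction L with
  | zero => rfl
  | succ L ih => simp [runWays, ih]

lemma runWays_eq (m L : Nat) :
    runWays m (L+1)
      = runWays m L ++ [((runWays m L).drop ((runWays m L).length - m)).sum % 1000000007] :=
  rfl

lemma w_succ (m L : Nat) :
    w m (L+1) = ((runWays m L).drop ((L+1) - m)).sum % 1000000007 := by
  unfold w
  rw [runWays_eq, List.getLastD_eq_getLast?, List.getLast?_concat, Option.getD_some,
      runWays_length]

lemma runWays_succ (m L : Nat) :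
    runWays m (L+1) = runWays m L ++ [w m (L+1)] := by
  rw [w_succ, runWays_eq, runWays_length]

lemma dropSum (m : Nat) : ∀ L k, k ≤ L + 1 →
    ((runWays m L).drop k).sum = ((List.range' k (L + 1 - k)).map (w m)).sum := by
  intro L
  induction L with
  | zero =>
    intro k hk
    interval_cases k
    · simp [runWays, List.range'_one, w_zero]
    · simp [runWays, List.range'_zero]
  | succ L ih =>
    intro k hk
    rcases Nat.lt_or_ge k (L+2) with hlt | hge
    · have hk' : k ≤ L+1 := by omega
      rw [runWays_succ, List.drop_append_of_le_length (by rw [runWays_length]; omega),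
          List.sum_append, ih k hk']
      rw [show L+1+1-k = (L+1-k)+1 from by omega, List.range'_concat, List.map_append,
          List.sum_append, show k + 1*(L+1-k) = L+1 from by omega]
      simp
    · have hk2 : k = L + 2 := by omega
      subst hk2
      rw [runWays_succ, List.drop_eq_nil_of_le (by rw [List.length_append, runWays_length]; simp),
          show L+1+1-(L+2) = 0 from by omega, List.range'_zero]
      simp

lemma w_rec (m : Nat) (hm : m = 3 ∨ m = 4) (j : Nat) (hj : 1 ≤ j) :
    w m j = (w m (j-1) +
      (if 2 ≤ j then w m (j-2) +
        (if 3 ≤ j then w m (j-3) +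
          (if 4 ≤ j ∧ m = 4 then w m (j-4) else 0)
         else 0)
       else 0)) % 1000000007 := by
  have h1 : w m j = (((List.range' (j - m) (j - (j - m))).map (w m)).sum) % 1000000007 := by
    conv_lhs => rw [show j = (j-1) + 1 from by omega]
    rw [w_succ, dropSum m (j-1) ((j-1)+1 - m) (by omega)]
    rw [show (j-1)+1-m = j-m from by omega]
    rw [show (j-1)+1-(j-m) = j - (j-m) from by omega]
  rcases hm with rfl | rfl
  · by_cases h4 : 4 ≤ j
    · rw [show j - (j-3) = 3 from by omega] at h1
      have hr3 : ∀ s : Nat, List.range' s 3 = [s, s+1, s+2] := fun s => rfl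
      rw [hr3 (j-3), show j-3+1 = j-2 from by omega, show j-3+2 = j-1 from by omega] at h1
      rw [if_pos (by omega : 2 ≤ j), if_pos (by omega : 3 ≤ j),
          if_neg (by rintro ⟨-, h⟩; exact absurd h (by norm_num))]
      rw [h1]; congr 1
      simp only [List.map_cons, List.map_nil, List.sum_cons, List.sum_nil]
      ring
    · have h3 : j ≤ 3 := by omega
      interval_cases j <;> decide
  · by_cases h4 : 4 ≤ j
    · rw [show j - (j-4) = 4 from by omega] at h1
      have hr4 : ∀ s : Nat, List.range' s 4 = [s, s+1, s+2, s+3] := fun s => rfl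
      rw [hr4 (j-4), show j-4+1 = j-3 from by omega, show j-4+2 = j-2 from by omega,
          show j-4+3 = j-1 from by omega] at h1
      rw [if_pos (by omega : 2 ≤ j), if_pos (by omega : 3 ≤ j), if_pos ⟨h4, rfl⟩]
      rw [h1]; congr 1
      simp only [List.map_cons, List.map_nil, List.sum_cons, List.sum_nil]
      ring
    · have h3 : j ≤ 3 := by omega
      interval_cases j <;> decide

lemma cfun_bounds (cs : List Char) (i : Nat) :
    0 ≤ cfun cs i ∧ cfun cs i < 1000000007 := by
  cases i with
  | zero => simp [cfun]
  | succ i =>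
    rw [cfun]
    exact ⟨Int.emod_nonneg _ (by norm_num), Int.emod_lt_of_pos _ (by norm_num)⟩

lemma cfun_prefix (cs ds : List Char) : ∀ i, i ≤ cs.length → cfun (cs ++ ds) i = cfun cs i := by
  intro i
  induction i using Nat.strong_induction_on with
  | _ i ih =>
    intro hi
    cases i with
    | zero => simp [cfun]
    | succ t =>
      have hg : ∀ k, k ≤ t → (cs ++ ds).getD k ' ' = cs.getD k ' ' := by
        intro k hk; rw [List.getD_append _ _ _ _ (by omega)]
      rw [cfun]
      conv_rhs => rw [cfun]
      rw [hg t le_rfl, hg (t-1) (by omega), hg (t-2) (by omega), hg (t-3) (by omega)]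
      rw [ih t (by omega) (by omega), ih (t-1) (by omega) (by omega),
          ih (t-2) (by omega) (by omega), ih (t-3) (by omega) (by omega)]

lemma pvME (x : Int) : x % 1000000007 ≡ x [ZMOD 1000000007] := Int.emod_emod_of_dvd x dvd_rfl

lemma emod_mul_right (a b : Int) :
    (a * (b % 1000000007)) % 1000000007 = (a * b) % 1000000007 := by
  conv_rhs => rw [Int.mul_emod]
  rw [Int.mul_emod, Int.emod_emod_of_dvd _ dvd_rfl]

lemma mod_sum1 (P a : Int) :
    (P * a % 1000000007) % 1000000007 = (P * (a % 1000000007)) % 1000000007 := by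
  rw [Int.emod_emod_of_dvd _ dvd_rfl, emod_mul_right]

lemma mod_sum2 (P a b : Int) :
    (P * a % 1000000007 + P * b % 1000000007) % 1000000007
      = (P * ((a + b) % 1000000007)) % 1000000007 := by
  have h : (P * a % 1000000007 + P * b % 1000000007) % 1000000007
      = (P * a + P * b) % 1000000007 := (pvME (P*a)).add (pvME (P*b))
  rw [h, emod_mul_right]; congr 1; ring

lemma mod_sum3 (P a b c : Int) :
    (P * a % 1000000007 + (P * b % 1000000007 + P * c % 1000000007)) % 1000000007
      = (P * ((a + (b + c)) % 1000000007)) % 1000000007 := by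
  have h : (P * a % 1000000007 + (P * b % 1000000007 + P * c % 1000000007)) % 1000000007
      = (P * a + (P * b + P * c)) % 1000000007 :=
    (pvME (P*a)).add ((pvME (P*b)).add (pvME (P*c)))
  rw [h, emod_mul_right]; congr 1; ring

lemma mod_sum4 (P a b c d : Int) :
    (P * a % 1000000007 + (P * b % 1000000007 + (P * c % 1000000007 + P * d % 1000000007))) % 1000000007
      = (P * ((a + (b + (c + d))) % 1000000007)) % 1000000007 := by
  have h : (P * a % 1000000007 + (P * b % 1000000007 + (P * c % 1000000007 + P * d % 1000000007))) % 1000000007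
      = (P * a + (P * b + (P * c + P * d))) % 1000000007 :=
    (pvME (P*a)).add ((pvME (P*b)).add ((pvME (P*c)).add (pvME (P*d))))
  rw [h, emod_mul_right]; congr 1; ring

lemma cfun_run_step (cs : List Char) (ch : Char) (L : Nat) (hlast : cs.getLast? ≠ some ch)
    (j : Nat) (hj : 1 ≤ j) (hjL : j ≤ L) :
    cfun (cs ++ List.replicate L ch) (cs.length + j)
      = (cfun (cs ++ List.replicate L ch) (cs.length + (j-1)) +
          (if 2 ≤ j then cfun (cs ++ List.replicate L ch) (cs.length + (j-2)) +
            (if 3 ≤ j then cfun (cs ++ List.replicate L ch) (cs.length + (j-3)) +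
              (if 4 ≤ j ∧ (ch = '7' ∨ ch = '9') then cfun (cs ++ List.replicate L ch) (cs.length + (j-4)) else 0)
             else 0)
           else 0)) % 1000000007 := by
  have hchar : ∀ t, t < L → (cs ++ List.replicate L ch).getD (cs.length + t) ' ' = ch := by
    intro t ht
    rw [List.getD_append_right _ _ _ _ (by omega)]
    rw [List.getD_eq_getElem?_getD, show cs.length + t - cs.length = t from by omega,
        List.getElem?_replicate, if_pos ht, Option.getD_some]
  have hpre : 0 < cs.length → (cs ++ List.replicate L ch).getD (cs.length - 1) ' ' ≠ ch := by
    intro hn hc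
    rw [List.getD_append _ _ _ _ (by omega)] at hc
    have hlt : cs.length - 1 < cs.length := by omega
    rw [List.getD_eq_getElem?_getD, List.getElem?_eq_getElem hlt, Option.getD_some] at hc
    exact hlast (by rw [List.getLast?_eq_getElem?, List.getElem?_eq_getElem hlt, hc])
  rw [show cs.length + j = (cs.length + (j-1)) + 1 from by omega, cfun]
  rw [hchar (j-1) (by omega)]
  by_cases h2 : 2 ≤ j
  · rw [show cs.length + (j-1) - 1 = cs.length + (j-2) from by omega]
    rw [if_pos ⟨by omega, (hchar (j-2) (by omega)).symm⟩, if_pos h2]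
    by_cases h3 : 3 ≤ j
    · rw [show cs.length + (j-1) - 2 = cs.length + (j-3) from by omega]
      rw [if_pos ⟨by omega, (hchar (j-3) (by omega)).symm⟩, if_pos h3]
      by_cases h4 : 4 ≤ j ∧ (ch = '7' ∨ ch = '9')
      · rw [show cs.length + (j-1) - 3 = cs.length + (j-4) from by omega]
        rw [if_pos ⟨by omega, (hchar (j-4) (by omega)).symm, h4.2⟩, if_pos h4]
      · have hneg : ¬(2 < cs.length + (j-1) ∧
            ch = (cs ++ List.replicate L ch).getD (cs.length + (j-1) - 3) ' ' ∧
            (ch = '7' ∨ ch = '9')) := by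
          rintro ⟨hlt, heq, hc79⟩
          by_cases hj4 : 4 ≤ j
          · exact h4 ⟨hj4, hc79⟩
          · have hn : 0 < cs.length := by omega
            rw [show cs.length + (j-1) - 3 = cs.length - 1 from by omega] at heq
            exact hpre hn heq.symm
        rw [if_neg hneg, if_neg h4]
    · have hneg : ¬(1 < cs.length + (j-1) ∧
          ch = (cs ++ List.replicate L ch).getD (cs.length + (j-1) - 2) ' ') := by
        rintro ⟨hlt, heq⟩
        have hn : 0 < cs.length := by omega
        rw [show cs.length + (j-1) - 2 = cs.length - 1 from by omega] at heq
        exact hpre hn heq.symm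
      rw [if_neg hneg, if_neg h3]
  · have hneg : ¬(0 < cs.length + (j-1) ∧
        ch = (cs ++ List.replicate L ch).getD (cs.length + (j-1) - 1) ' ') := by
      rintro ⟨hlt, heq⟩
      have hn : 0 < cs.length := by omega
      rw [show cs.length + (j-1) - 1 = cs.length - 1 from by omega] at heq
      exact hpre hn heq.symm
    rw [if_neg hneg, if_neg h2]

lemma run_lemma (cs : List Char) (ch : Char) (L : Nat) (hlast : cs.getLast? ≠ some ch)
    (j : Nat) : 1 ≤ j → j ≤ L →
    cfun (cs ++ List.replicate L ch) (cs.length + j)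
      = (cfun (cs ++ List.replicate L ch) cs.length
          * w (if ch = '7' ∨ ch = '9' then 4 else 3) j) % 1000000007 := by
  induction j using Nat.strong_induction_on with
  | _ j ih =>
    intro hj1 hjL
    obtain ⟨hP0, hP1⟩ := cfun_bounds (cs ++ List.replicate L ch) cs.length
    have hval : ∀ t, t < j → cfun (cs ++ List.replicate L ch) (cs.length + t)
        = (cfun (cs ++ List.replicate L ch) cs.length
            * w (if ch = '7' ∨ ch = '9' then 4 else 3) t) % 1000000007 := by
      intro t ht
      rcases Nat.eq_zero_or_pos t with rfl | htpos
      · rw [Nat.add_zero, w_zero, mul_one, Int.emod_eq_of_lt hP0 hP1]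
      · exact ih t ht htpos (by omega)
    rw [cfun_run_step cs ch L hlast j hj1 hjL,
        hval (j-1) (by omega), hval (j-2) (by omega), hval (j-3) (by omega),
        hval (j-4) (by omega)]
    by_cases hc : ch = '7' ∨ ch = '9'
    · simp only [if_pos hc]
      rw [w_rec 4 (Or.inr rfl) j hj1]
      simp only [and_true]
      by_cases h4 : 4 ≤ j
      · simp only [if_pos (show 4 ≤ j ∧ (ch = '7' ∨ ch = '9') from ⟨h4, hc⟩),
            if_pos h4,
            if_pos (show 2 ≤ j from by omega), if_pos (show 3 ≤ j from by omega)]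
        exact mod_sum4 _ _ _ _ _
      · simp only [if_neg (show ¬(4 ≤ j ∧ (ch = '7' ∨ ch = '9')) from fun h => h4 h.1),
            if_neg h4]
        by_cases h3 : 3 ≤ j
        · simp only [if_pos h3, if_pos (show 2 ≤ j from by omega), add_zero]
          exact mod_sum3 _ _ _ _
        · simp only [if_neg h3]
          by_cases h2 : 2 ≤ j
          · simp only [if_pos h2, add_zero]
            exact mod_sum2 _ _ _
          · simp only [if_neg h2, add_zero]
            exact mod_sum1 _ _
    · simp only [if_neg hc]
      rw [w_rec 3 (Or.inl rfl) j hj1]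
      simp only [eq_false (by norm_num : ¬((3:Nat) = 4)), and_false, if_false]
      simp only [if_neg (show ¬(4 ≤ j ∧ (ch = '7' ∨ ch = '9')) from fun h => hc h.2)]
      by_cases h3 : 3 ≤ j
      · simp only [if_pos h3, if_pos (show 2 ≤ j from by omega), add_zero]
        exact mod_sum3 _ _ _ _
      · simp only [if_neg h3]
        by_cases h2 : 2 ≤ j
        · simp only [if_pos h2, add_zero]
          exact mod_sum2 _ _ _
        · simp only [if_neg h2, add_zero]
          exact mod_sum1 _ _

lemma runStep_run (c : Char) : ∀ (L' : Nat) (rs : List (Char × Nat)) (k : Nat),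
    List.foldl runStep (rs ++ [(c,k)]) (List.replicate L' c) = rs ++ [(c, k + L')] := by
  intro L'
  induction L' with
  | zero => intro rs k; simp
  | succ L' ih =>
    intro rs k
    rw [List.replicate_succ, List.foldl_cons]
    have hstep : runStep (rs ++ [(c,k)]) c = rs ++ [(c,k+1)] := by
      simp [runStep]
    rw [hstep, ih, show k + 1 + L' = k + (L'+1) from by omega]

lemma runsOf_lastChar (cs : List Char) :
    (runsOf cs).getLast?.map Prod.fst = cs.getLast? := by
  induction cs using List.reverseRecOn with
  | nil => rfl
  | append_singleton ds a ih =>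
    have h1 : runsOf (ds ++ [a]) = runStep (runsOf ds) a := by
      rw [runsOf, List.foldl_append, List.foldl_cons, List.foldl_nil]; rfl
    rw [h1, List.getLast?_concat]
    cases h : (runsOf ds).getLast? with
    | none => simp [runStep, h]
    | some p =>
      obtain ⟨c, k⟩ := p
      by_cases hca : c = a
      · subst hca; simp [runStep, h]
      · simp [runStep, h, hca]

lemma runsOf_append (cs : List Char) (ch : Char) (L : Nat)
    (hlast : cs.getLast? ≠ some ch) (hL : 1 ≤ L) :
    runsOf (cs ++ List.replicate L ch) = runsOf cs ++ [(ch, L)] := by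
  obtain ⟨L'', rfl⟩ : ∃ L'', L = L'' + 1 := ⟨L - 1, by omega⟩
  rw [runsOf, List.foldl_append, List.replicate_succ, List.foldl_cons]
  have hstep : runStep (List.foldl runStep [] cs) ch = runsOf cs ++ [(ch, 1)] := by
    cases h : (runsOf cs).getLast? with
    | none =>
      have hnil : runsOf cs = [] := List.getLast?_eq_none_iff.mp h
      rw [show List.foldl runStep [] cs = runsOf cs from rfl]
      simp [runStep, hnil]
    | some p =>
      obtain ⟨c, k⟩ := p
      have hc : cs.getLast? = some c := by
        rw [← runsOf_lastChar cs, h]; rfl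
      have hne : c ≠ ch := fun e => hlast (by rw [hc, e])
      rw [show List.foldl runStep [] cs = runsOf cs from rfl]
      simp [runStep, h, hne]
  rw [hstep, runStep_run, show 1 + L'' = L'' + 1 from by omega]

lemma run_decomp (cs : List Char) (h : cs ≠ []) :
    ∃ ds ch L, 1 ≤ L ∧ cs = ds ++ List.replicate L ch ∧ ds.getLast? ≠ some ch := by
  induction cs using List.reverseRecOn with
  | nil => exact absurd rfl h
  | append_singleton ds a ih =>
    rcases eq_or_ne ds [] with rfl | hds
    · exact ⟨[], a, 1, le_rfl, by simp, by simp⟩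
    · by_cases hl : ds.getLast? = some a
      · obtain ⟨es, ch, L, hL, hdse, hlast2⟩ := ih hds
        have hrepne : List.replicate L ch ≠ [] := by
          rw [Ne, List.replicate_eq_nil_iff]; omega
        have hcha : ch = a := by
          rw [hdse, List.getLast?_append_of_ne_nil _ hrepne, List.getLast?_replicate,
              if_neg (by omega)] at hl
          exact Option.some.inj hl
        subst hcha
        exact ⟨es, ch, L+1, by omega,
          by rw [hdse, List.replicate_succ', ← List.append_assoc], hlast2⟩
      · exact ⟨ds, a, 1, le_rfl, by simp, hl⟩

lemma astep_spec (cs : List Char) (i : Nat) (cache : List Int)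
    (h0 : cache.getD i 0 = cfun cs i) (h1 : cache.getD (i-1) 0 = cfun cs (i-1))
    (h2 : cache.getD (i-2) 0 = cfun cs (i-2)) (h3 : cache.getD (i-3) 0 = cfun cs (i-3)) :
    astep cs cache i = cache.set (i+1) (cfun cs (i+1)) := by
  simp only [astep]
  rw [h0, h1, h2, h3]
  congr 1
  conv_rhs => rw [cfun]
  congr 1
  split_ifs <;> ring

lemma map_range_succ (f : Nat → Int) (n : Nat) :
    (List.range (n+1)).map f = (List.range n).map f ++ [f n] := by
  rw [List.range_succ, List.map_append]; rfl

lemma set_front (cs : List Char) (i : Nat) (hi : i < cs.length) :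
    ((List.range (i+1)).map (cfun cs) ++ List.replicate (cs.length - i) 0).set (i+1) (cfun cs (i+1))
      = (List.range (i+1+1)).map (cfun cs) ++ List.replicate (cs.length - (i+1)) 0 := by
  rw [List.set_append]
  simp only [List.length_map, List.length_range]
  rw [if_neg (by omega), show i+1 - (i+1) = 0 from by omega,
      show cs.length - i = (cs.length - (i+1)) + 1 from by omega,
      List.replicate_succ, List.set_cons_zero,
      map_range_succ (cfun cs) (i+1), List.append_assoc, List.singleton_append]

lemma ainv (cs : List Char) : ∀ i, i ≤ cs.length →
    (List.range i).foldl (astep cs) (((List.range (cs.length+1)).map (fun _ => (0:Int))).set 0 1)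
      = (List.range (i+1)).map (cfun cs) ++ List.replicate (cs.length - i) 0 := by
  intro i
  induction i with
  | zero =>
    intro _
    rw [List.range_zero, List.foldl_nil]
    have h0 : (List.range (cs.length+1)).map (fun _ => (0:Int))
        = List.replicate (cs.length+1) 0 := by
      rw [List.map_const', List.length_range]
    rw [h0, List.replicate_succ, List.set_cons_zero]
    simp [cfun]
  | succ i ih =>
    intro hi
    have hg : ∀ k, k ≤ i →
        ((List.range (i+1)).map (cfun cs) ++ List.replicate (cs.length - i) 0).getD k 0
          = cfun cs k := by
      intro k hk
      rw [List.getD_append _ _ _ _ (by simp; omega)]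
      rw [List.getD_eq_getElem?_getD, List.getElem?_map, List.getElem?_range (by omega)]
      rfl
    rw [List.range_succ (n := i), List.foldl_append, List.foldl_cons, List.foldl_nil, ih (by omega),
        astep_spec cs i _ (hg i le_rfl) (hg (i-1) (by omega)) (hg (i-2) (by omega))
          (hg (i-3) (by omega)),
        set_front cs i (by omega)]

lemma a_eq_cfun (s : String) : countTexts s = cfun s.toList s.toList.length := by
  simp only [countTexts]
  rw [ainv s.toList s.toList.length le_rfl]
  rw [Nat.sub_self, List.replicate_zero, List.append_nil]
  rw [PySem.List.pyGet?_neg_one]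
  rw [map_range_succ, List.getLast?_concat, Option.getD_some]

lemma main_eq : ∀ n (cs : List Char), cs.length = n →
    cfun cs cs.length = (runsOf cs).foldl bstep 1 := by
  intro n
  induction n using Nat.strong_induction_on with
  | _ n ih =>
    intro cs hcs
    rcases eq_or_ne cs [] with rfl | hne
    · simp [cfun, runsOf]
    · obtain ⟨ds, ch, L, hL, rfl, hlast⟩ := run_decomp cs hne
      have hlen : (ds ++ List.replicate L ch).length = ds.length + L := by simp
      rw [List.length_append, List.length_replicate] at hcs
      rw [hlen, run_lemma ds ch L hlast L hL le_rfl,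
          cfun_prefix ds (List.replicate L ch) ds.length le_rfl,
          ih ds.length (by omega) ds rfl,
          runsOf_append ds ch L hlast hL, List.foldl_append, List.foldl_cons, List.foldl_nil]
      simp [bstep]

-- ===== VERDICT (by name: the statement is the Claim_ definition above) =====
theorem countTexts_spec : Claim_equal_countTexts := by
  intro s _
  unfold Spec_countTexts
  rw [a_eq_cfun, alt_eq, main_eq s.toList.length s.toList rfl]
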